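-- pv_equiv track=rewrite | github.com/hoho145/Mamma-titanz | Superteams/newstrategy.py | exact_angle
-- ===== SOURCE A (Python) =====
-- def exact_angle(angle):
--     da=[0,90,180,-180,-90]
--     correct_angle=0
--     for i in range(5):
--         if (abs(angle-da[i])<=5):
--             correct_angle=da[i]
--             break
--     return correct_angle
-- ===== SOURCE B (Python) =====
-- def exact_angle(angle):
--     cand = ((angle + 45) // 90) * 90
--     if cand in (0, 90, 180, -180, -90) and abs(angle - cand) <= 5:
--         return cand
--     return 0
-- ===== Notes on version B (the rewrite author's own statement) =====
-- stated objective: idiomatic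
-- what changed: Replaced the 5-candidate linear scan with a closed-form nearest-multiple-of-90 computation ((angle+45)//90*90) followed by one membership-and-threshold check.
import Mathlib
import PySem

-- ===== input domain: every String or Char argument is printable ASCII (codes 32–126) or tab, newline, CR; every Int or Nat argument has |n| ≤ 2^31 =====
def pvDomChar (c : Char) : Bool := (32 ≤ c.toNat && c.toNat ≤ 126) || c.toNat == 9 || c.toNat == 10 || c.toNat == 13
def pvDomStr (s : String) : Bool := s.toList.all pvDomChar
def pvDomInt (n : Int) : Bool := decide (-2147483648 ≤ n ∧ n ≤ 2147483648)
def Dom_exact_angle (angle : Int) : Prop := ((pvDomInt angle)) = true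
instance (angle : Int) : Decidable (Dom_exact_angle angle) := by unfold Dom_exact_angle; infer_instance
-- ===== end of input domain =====

-- B replaces A's 5-candidate scan by a closed-form nearest-multiple-of-90 computation (idiomatic; same O(1) cost).


-- ===== PORT A =====
-- the for-loop with break: scan the candidate list, return the first d with abs(angle-d) <= 5, else 0
def eaScan (angle : Int) : List Int → Int
  | [] => 0
  | d :: rest => if |angle - d| ≤ 5 then d else eaScan angle rest

def exact_angle (angle : Int) : Int :=
  let da : List Int := [0, 90, 180, -180, -90]
  eaScan angle da

-- ===== PORT B =====
def exact_angle_alt (angle : Int) : Int :=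
  let cand := PySem.Int.floordiv (angle + 45) 90 * 90
  if (cand = 0 ∨ cand = 90 ∨ cand = 180 ∨ cand = -180 ∨ cand = -90) ∧ |angle - cand| ≤ 5 then
    cand
  else 0

-- ===== PRECONDITION & SPEC =====
def Spec_exact_angle (angle : Int) (out : Int) : Prop := out = exact_angle_alt angle
instance (angle : Int) (out : Int) : Decidable (Spec_exact_angle angle out) := by unfold Spec_exact_angle; infer_instance

-- ===== CLAIM (what is proved, stated in full; the proofs are below) =====
def Claim_equal_exact_angle : Prop := ∀ (angle : Int), Dom_exact_angle angle → Spec_exact_angle angle (exact_angle angle)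

-- ===== LEMMAS AND PROOFS =====

-- ===== VERDICT (by name: the statement is the Claim_ definition above) =====
theorem exact_angle_spec : Claim_equal_exact_angle := by
  intro angle _
  unfold Spec_exact_angle
  simp only [exact_angle, exact_angle_alt, eaScan]
  rw [PySem.Int.floordiv_eq_ediv_of_pos (by norm_num)]
  simp only [abs_le]
  split_ifs <;> omega
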